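-- pv_equiv track=rewrite | github.com/Jeihyuck/Salesbot | rubicon-main/apps/rubicon_v3/__function/_62_complement_code_mapping_utils.py | split_ner_by_categories
-- ===== SOURCE A (Python) =====
-- def split_ner_by_categories(ner_value):
--     split_lists = []
--
--     split_indices = []
--
--     for i, item in enumerate(ner_value):
--         field = item.get('field')
--         operator = item.get('operator')
--
--         if field in ['product_color', 'product_model', 'product_code'] or (field == 'product_option' and operator in ['min', 'max']):
--             split_indices.append(i)
--
--     if not split_indices:
--         return [ner_value]
--
--     start = 0
--     for idx in split_indices:
--         if start < idx:
--             split_lists.append(ner_value[start:idx])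
--
--         split_lists.append([ner_value[idx]])
--
--         start = idx + 1
--
--     if start < len(ner_value):
--         split_lists.append(ner_value[start:])
--
--     return split_lists
-- ===== SOURCE B (Python) =====
-- def split_ner_by_categories(ner_value):
--     def is_boundary(item):
--         field = item.get('field')
--         operator = item.get('operator')
--         return field in ('product_color', 'product_model', 'product_code') or (
--             field == 'product_option' and operator in ('min', 'max'))
--
--     result = []
--     current = []
--     for item in ner_value:
--         if is_boundary(item):
--             if current:
--                 result.append(current)
--                 current = []
--             result.append([item])
--         else:
--             current.append(item)
--     if current:
--         result.append(current)
--     return result or [ner_value]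
-- ===== Notes on version B (the rewrite author's own statement) =====
-- stated objective: simpler
-- what changed: Replaced the two-phase algorithm (collect boundary indices, then slice the list between them) with a single pass that keeps a current-group buffer, flushing it at each boundary item, with 'result or [ner_value]' covering the empty case.
import Mathlib
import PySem

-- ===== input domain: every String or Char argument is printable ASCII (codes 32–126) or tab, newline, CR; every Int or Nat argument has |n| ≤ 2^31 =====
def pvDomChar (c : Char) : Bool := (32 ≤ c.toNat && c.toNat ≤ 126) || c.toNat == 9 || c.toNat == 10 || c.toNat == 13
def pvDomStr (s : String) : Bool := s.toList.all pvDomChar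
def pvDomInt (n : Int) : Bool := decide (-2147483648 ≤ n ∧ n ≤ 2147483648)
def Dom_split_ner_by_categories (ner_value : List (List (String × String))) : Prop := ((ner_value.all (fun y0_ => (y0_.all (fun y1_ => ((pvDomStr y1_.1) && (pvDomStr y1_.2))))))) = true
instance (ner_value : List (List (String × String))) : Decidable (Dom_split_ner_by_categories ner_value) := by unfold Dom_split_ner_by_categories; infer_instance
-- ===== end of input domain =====

-- B replaces A's two-phase split (collect boundary indices, then slice) by a single
-- pass with a current-group buffer — a simpler decomposition with the same cost.


-- ===== PORT A =====
-- a dict item maps to an association list; item.get(k) is first-match lookup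
-- the boundary test of A's first loop (field/operator lookups inlined as in A)
def pvStepIdxA (acc : List Int) (p : Int × List (String × String)) : List Int :=
  let field := p.2.lookup "field"
  let operator := p.2.lookup "operator"
  if [some "product_color", some "product_model", some "product_code"].contains field
      || (field == some "product_option" && [some "min", some "max"].contains operator)
  then acc ++ [p.1] else acc

-- one iteration of A's second loop: state = (split_lists, start)
def pvStepSliceA (ner_value : List (List (String × String)))
    (st : List (List (List (String × String))) × Int) (idx : Int) :
    List (List (List (String × String))) × Int :=
  let sl := if st.2 < idx then st.1 ++ [PySem.List.slice ner_value (some st.2) (some idx)] else st.1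
  (sl ++ [[PySem.List.pyGetD ner_value idx []]], idx + 1)

def split_ner_by_categories (ner_value : List (List (String × String))) : List (List (List (String × String))) :=
  let split_indices := (PySem.List.enumerate ner_value 0).foldl pvStepIdxA []
  if split_indices = [] then [ner_value]
  else
    let st := split_indices.foldl (pvStepSliceA ner_value) ([], 0)
    if st.2 < (ner_value.length : Int) then st.1 ++ [PySem.List.slice ner_value (some st.2) none]
    else st.1

-- ===== PORT B =====
def pvIsBoundaryB (item : List (String × String)) : Bool :=
  let field := item.lookup "field"
  let operator := item.lookup "operator"
  [some "product_color", some "product_model", some "product_code"].contains field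
    || (field == some "product_option" && [some "min", some "max"].contains operator)

-- one iteration of B's loop: state = (result, current)
def pvStepB (st : List (List (List (String × String))) × List (List (String × String)))
    (item : List (String × String)) :
    List (List (List (String × String))) × List (List (String × String)) :=
  if pvIsBoundaryB item then
    ((if st.2.isEmpty then st.1 else st.1 ++ [st.2]) ++ [[item]], [])
  else (st.1, st.2 ++ [item])

def split_ner_by_categories_alt (ner_value : List (List (String × String))) : List (List (List (String × String))) :=
  let st := ner_value.foldl pvStepB ([], [])
  let res := if st.2.isEmpty then st.1 else st.1 ++ [st.2]
  if res = [] then [ner_value] else res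

-- ===== PRECONDITION & SPEC =====
def Spec_split_ner_by_categories (ner_value : List (List (String × String))) (out : List (List (List (String × String)))) : Prop := out = split_ner_by_categories_alt ner_value
instance (ner_value : List (List (String × String))) (out : List (List (List (String × String)))) : Decidable (Spec_split_ner_by_categories ner_value out) := by unfold Spec_split_ner_by_categories; infer_instance

-- ===== CLAIM (what is proved, stated in full; the proofs are below) =====
def Claim_equal_split_ner_by_categories : Prop := ∀ (ner_value : List (List (String × String))), Dom_split_ner_by_categories ner_value → Spec_split_ner_by_categories ner_value (split_ner_by_categories ner_value)

-- ===== LEMMAS AND PROOFS =====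

-- the groups produced by B's buffered pass, as a structural recursion
def pvGroups : List (List (String × String)) → List (List (String × String)) →
    List (List (List (String × String)))
  | cur, [] => if cur.isEmpty then [] else [cur]
  | cur, x :: xs =>
    if pvIsBoundaryB x then (if cur.isEmpty then [] else [cur]) ++ [x] :: pvGroups [] xs
    else pvGroups (cur ++ [x]) xs

-- the boundary indices of a list, counting from s
def pvIdxs : List (List (String × String)) → Int → List Int
  | [], _ => []
  | x :: xs, s => (if pvIsBoundaryB x then [s] else []) ++ pvIdxs xs (s + 1)

theorem pvStepIdxA_eq (acc : List Int) (p : Int × List (String × String)) :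
    pvStepIdxA acc p = if pvIsBoundaryB p.2 then acc ++ [p.1] else acc := rfl

theorem pvIdxsA_spec (l : List (List (String × String))) :
    ∀ (s : Int) (acc : List Int),
      (PySem.List.enumerate l s).foldl pvStepIdxA acc = acc ++ pvIdxs l s := by
  induction l with
  | nil => intro s acc; simp [PySem.List.enumerate_nil, pvIdxs]
  | cons x xs ih =>
    intro s acc
    rw [PySem.List.enumerate_cons]
    simp only [List.foldl_cons, pvStepIdxA_eq, pvIdxs, ih]
    by_cases h : pvIsBoundaryB x <;> simp [h]

def pvFlush (st : List (List (List (String × String))) × List (List (String × String))) :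
    List (List (List (String × String))) :=
  if st.2.isEmpty then st.1 else st.1 ++ [st.2]

theorem pvGroupsB_spec (l : List (List (String × String))) :
    ∀ (res : List (List (List (String × String)))) (cur : List (List (String × String))),
      pvFlush (l.foldl pvStepB (res, cur)) = res ++ pvGroups cur l := by
  induction l with
  | nil => intro res cur; by_cases h : cur.isEmpty <;> simp [pvFlush, pvGroups, h]
  | cons x xs ih =>
    intro res cur
    simp only [List.foldl_cons, pvStepB, pvGroups]
    by_cases hb : pvIsBoundaryB x
    · by_cases hc : cur.isEmpty
      · simp only [hb, hc, if_pos]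
        rw [ih]
        simp
      · simp only [hb, hc, if_pos]
        rw [ih]
        simp
    · simp only [hb, Bool.false_eq_true, if_false]
      rw [ih]

theorem pvGroups_nil_iff (l : List (List (String × String))) :
    ∀ cur, pvGroups cur l = [] → cur = [] ∧ l = [] := by
  induction l with
  | nil =>
    intro cur h
    simp only [pvGroups] at h
    by_cases hc : cur.isEmpty
    · exact ⟨List.isEmpty_iff.mp hc, rfl⟩
    · simp [hc] at h
  | cons x xs ih =>
    intro cur h
    simp only [pvGroups] at h
    by_cases hb : pvIsBoundaryB x
    · simp [hb] at h
    · simp only [hb] at h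
      have := (ih _ h).1
      simp at this

theorem pvGroups_of_idxs_nil (l : List (List (String × String))) :
    ∀ (s : Int) (cur : List (List (String × String))), pvIdxs l s = [] →
      pvGroups cur l = if (cur ++ l).isEmpty then [] else [cur ++ l] := by
  induction l with
  | nil => intro s cur _; simp [pvGroups]
  | cons x xs ih =>
    intro s cur h
    simp only [pvIdxs] at h
    by_cases hb : pvIsBoundaryB x
    · simp [hb] at h
    · simp only [hb] at h
      simp only [pvGroups, hb, Bool.false_eq_true]
      rw [ih (s + 1) (cur ++ [x]) (by simpa using h)]
      simp

theorem pvPhase2_spec (l₀ : List (List (String × String))) :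
    ∀ (t : List (List (String × String))) (s b : Nat)
      (acc : List (List (List (String × String)))),
      l₀.drop s = t → s ≤ l₀.length → b ≤ s →
      (let st := (pvIdxs t (s : Int)).foldl (pvStepSliceA l₀) (acc, (b : Int));
       if st.2 < (l₀.length : Int) then
         st.1 ++ [PySem.List.slice l₀ (some st.2) none]
       else st.1)
      = acc ++ pvGroups ((l₀.drop b).take (s - b)) t := by
  intro t
  induction t with
  | nil =>
    intro s b acc hdrop hs hb
    have hs' : s = l₀.length := by
      have := congrArg List.length hdrop; simp at this; omega
    simp only [pvIdxs, List.foldl_nil]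
    by_cases hbl : b < l₀.length
    · have hlt : (b : Int) < (l₀.length : Int) := by exact_mod_cast hbl
      simp only [hlt, if_pos, pvGroups]
      rw [PySem.List.slice_from_natCast]
      have hcur : ((l₀.drop b).take (s - b)) = l₀.drop b := by
        apply List.take_of_length_le; simp; omega
      rw [hcur]
      have : (l₀.drop b).isEmpty = false := by
        simp [List.isEmpty_iff_length_eq_zero]; omega
      simp [this]
    · have hbe : b = l₀.length := by omega
      have hlt : ¬ ((b : Int) < (l₀.length : Int)) := by exact_mod_cast not_lt.mpr (le_of_eq hbe.symm)
      simp only [hlt, pvGroups]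
      have : ((l₀.drop b).take (s - b)).isEmpty = true := by
        simp [List.isEmpty_iff_length_eq_zero]; omega
      simp [this]
  | cons x xs ih =>
    intro s b acc hdrop hs hb
    have hslt : s < l₀.length := by
      have := congrArg List.length hdrop; simp at this; omega
    have hxget : l₀[s]? = some x := by
      have : (l₀.drop s)[0]? = some x := by rw [hdrop]; rfl
      simpa using this
    simp only [pvIdxs]
    by_cases hbx : pvIsBoundaryB x
    · simp only [hbx, if_pos, List.singleton_append, List.foldl_cons]
      have hstep : pvStepSliceA l₀ (acc, (b : Int)) (s : Int)
          = ((if b < s then acc ++ [(l₀.drop b).take (s - b)] else acc) ++ [[x]], (s : Int) + 1) := by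
        simp only [pvStepSliceA]
        have hcast : ((b : Int) < (s : Int)) ↔ b < s := by exact_mod_cast Iff.rfl
        have hget : PySem.List.pyGetD l₀ (s : Int) [] = x := by
          rw [PySem.List.pyGetD_natCast]
          simp [List.getD_eq_getElem?_getD, hxget]
        rw [PySem.List.slice_natCast, hget]
        by_cases hbs : b < s
        · simp [hcast, hbs]
        · simp [hcast, hbs]
      rw [hstep]
      have hsucc : (s : Int) + 1 = ((s + 1 : Nat) : Int) := by push_cast; ring
      rw [hsucc]
      have hdrop' : l₀.drop (s + 1) = xs := by
        rw [← List.drop_drop, hdrop]; rfl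
      rw [ih (s + 1) (s + 1) _ hdrop' (by omega) (le_refl _)]
      simp only [pvGroups, hbx, if_pos]
      have hcur0 : ((l₀.drop (s + 1)).take (s + 1 - (s + 1))) = [] := by simp
      rw [hcur0]
      have hempty : ((l₀.drop b).take (s - b)).isEmpty = (decide (b < s) = false) := by
        simp [List.isEmpty_iff_length_eq_zero]; omega
      by_cases hbs : b < s
      · have : ((l₀.drop b).take (s - b)).isEmpty = false := by
          simp [List.isEmpty_iff_length_eq_zero]; omega
        simp [hbs, this]
      · have : ((l₀.drop b).take (s - b)).isEmpty = true := by
          simp [List.isEmpty_iff_length_eq_zero]; omega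
        simp [hbs, this]
    · simp only [hbx, Bool.false_eq_true, not_false_iff, ite_false, List.nil_append]
      have hsucc : (s : Int) + 1 = ((s + 1 : Nat) : Int) := by push_cast; ring
      rw [hsucc]
      have hdrop' : l₀.drop (s + 1) = xs := by
        rw [← List.drop_drop, hdrop]; rfl
      rw [ih (s + 1) b acc hdrop' (by omega) (by omega)]
      simp only [pvGroups, hbx, Bool.false_eq_true, ite_false]
      congr 2
      have hx : (l₀.drop b)[s - b]? = some x := by
        rw [List.getElem?_drop]
        have : b + (s - b) = s := by omega
        rw [this, hxget]
      have : s + 1 - b = (s - b) + 1 := by omega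
      rw [this, List.take_add_one, hx]
      simp

-- ===== VERDICT (by name: the statement is the Claim_ definition above) =====
theorem split_ner_by_categories_spec : Claim_equal_split_ner_by_categories := by
  intro l _
  unfold Spec_split_ner_by_categories split_ner_by_categories split_ner_by_categories_alt
  rw [pvIdxsA_spec l 0 []]
  simp only [List.nil_append]
  have hB := pvGroupsB_spec l [] []
  unfold pvFlush at hB
  rw [hB]
  simp only [List.nil_append]
  by_cases h : pvIdxs l 0 = []
  · rw [if_pos h]
    rw [pvGroups_of_idxs_nil l 0 [] h]
    simp only [List.nil_append]
    by_cases hl : l.isEmpty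
    · simp [hl]
    · simp only [hl, Bool.false_eq_true, if_neg, not_false_iff]
      have : ([l] : List _) ≠ [] := by simp
      simp [this]
  · rw [if_neg h]
    have h0 : (0 : Int) = ((0 : Nat) : Int) := rfl
    have := pvPhase2_spec l l 0 0 [] (by simp) (by omega) (le_refl _)
    simp only [Nat.cast_zero, List.drop_zero, Nat.sub_zero, List.take_zero, List.nil_append] at this
    rw [this]
    have hne : pvGroups [] l ≠ [] := by
      intro hc
      rcases pvGroups_nil_iff l [] hc with ⟨-, hl⟩
      subst hl
      exact h rfl
    simp [hne]
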